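-- pv_equiv track=rewrite | github.com/shivsharcode/Problem-Solving | CODECHEF/Normal is Good(Optimal Approach).py | grouping_consecutive
-- ===== SOURCE A (Python) =====
-- def grouping_consecutive(val, arr):
--     count = 0
--     group = 0
--
--     for i in arr:
--         if i == val:
--             count += 1
--         else:
--             group += count*(count+1)//2
--             count = 0
--     #last element
--     group += count*(count+1)//2
--
--     return group
-- ===== SOURCE B (Python) =====
-- def rle(arr):
--     """Run-length encode: list of (value, run_length) for maximal runs."""
--     runs = []
--     for x in arr:
--         if runs and runs[-1][0] == x:
--             runs[-1] = (runs[-1][0], runs[-1][1] + 1)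
--         else:
--             runs.append((x, 1))
--     return runs
--
-- def grouping_consecutive(val, arr):
--     return sum(L * (L + 1) // 2 for v, L in rle(arr) if v == val)
-- ===== Notes on version B (the rewrite author's own statement) =====
-- stated objective: idiomatic
-- what changed: Replaces A's single-pass running-count-with-reset accumulator by a staged grouping-then-reduce: first run-length-encode the list into (value, length) runs, then sum L*(L+1)//2 over runs whose value equals val.
import Mathlib
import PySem

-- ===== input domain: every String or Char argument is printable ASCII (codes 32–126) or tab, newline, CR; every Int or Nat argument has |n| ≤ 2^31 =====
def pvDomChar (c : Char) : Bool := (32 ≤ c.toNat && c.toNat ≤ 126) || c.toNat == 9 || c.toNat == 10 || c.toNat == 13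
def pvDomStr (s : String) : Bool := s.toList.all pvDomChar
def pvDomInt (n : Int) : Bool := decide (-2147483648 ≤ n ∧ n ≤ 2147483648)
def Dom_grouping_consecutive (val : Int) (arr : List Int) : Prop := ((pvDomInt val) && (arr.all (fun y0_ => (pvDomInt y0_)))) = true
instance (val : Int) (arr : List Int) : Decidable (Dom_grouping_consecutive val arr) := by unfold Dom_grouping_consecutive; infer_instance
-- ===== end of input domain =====

-- B replaces A's running-count-with-reset scan by a staged grouping-then-reduce:
-- run-length-encode the list, then sum L*(L+1)//2 over the runs keyed by val (idiomatic decomposition, same cost).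

-- ===== PORT A =====
-- triangle number via Python's //
def pvTri (c : Int) : Int := PySem.Int.floordiv (c * (c + 1)) 2

-- A's loop body over state (count, group)
def pvStepA (val : Int) (st : Int × Int) (i : Int) : Int × Int :=
  if i = val then (st.1 + 1, st.2) else (0, st.2 + pvTri st.1)

def grouping_consecutive (val : Int) (arr : List Int) : Int :=
  let st := arr.foldl (pvStepA val) (0, 0)
  st.2 + pvTri st.1

-- ===== PORT B =====
-- Source B's rle loop body: extend the last run or append a fresh run (runs[-1] access/update ported as getLast?/dropLast)
def pvStepRle (runs : List (Int × Int)) (x : Int) : List (Int × Int) :=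
  match runs.getLast? with
  | some (v, L) => if v = x then runs.dropLast ++ [(v, L + 1)] else runs ++ [(x, 1)]
  | none => [(x, 1)]

def pvRle (arr : List Int) : List (Int × Int) := arr.foldl pvStepRle []

-- the filtered sum comprehension of Source B
def grouping_consecutive_alt (val : Int) (arr : List Int) : Int :=
  (pvRle arr).foldl (fun acc p => if p.1 = val then acc + pvTri p.2 else acc) 0

-- ===== PRECONDITION & SPEC =====
def Spec_grouping_consecutive (val : Int) (arr : List Int) (out : Int) : Prop := out = grouping_consecutive_alt val arr
instance (val : Int) (arr : List Int) (out : Int) : Decidable (Spec_grouping_consecutive val arr out) := by unfold Spec_grouping_consecutive; infer_instance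

-- ===== CLAIM (what is proved, stated in full; the proofs are below) =====
def Claim_equal_grouping_consecutive : Prop := ∀ (val : Int) (arr : List Int), Dom_grouping_consecutive val arr → Spec_grouping_consecutive val arr (grouping_consecutive val arr)

-- ===== LEMMAS AND PROOFS =====

-- the filtered triangular sum over a run list
def pvS (val : Int) (runs : List (Int × Int)) : Int :=
  runs.foldl (fun acc p => if p.1 = val then acc + pvTri p.2 else acc) 0

-- count A would hold at the end of the runs: length of the last run if keyed by val
def pvLastC (val : Int) (runs : List (Int × Int)) : Int :=
  match runs.getLast? with
  | some (v, L) => if v = val then L else 0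
  | none => 0

theorem pvS_concat (val : Int) (runs : List (Int × Int)) (p : Int × Int) :
    pvS val (runs ++ [p]) = pvS val runs + (if p.1 = val then pvTri p.2 else 0) := by
  unfold pvS
  rw [List.foldl_append]
  simp only [List.foldl_cons, List.foldl_nil]
  split_ifs <;> simp

theorem pvTri_zero : pvTri 0 = 0 := by decide

-- the loop invariant tying A's state to B's run list
theorem pvInv (val : Int) (arr : List Int) :
    (arr.foldl (pvStepA val) (0, 0)).2 + pvTri (arr.foldl (pvStepA val) (0, 0)).1 = pvS val (pvRle arr) ∧
    (arr.foldl (pvStepA val) (0, 0)).1 = pvLastC val (pvRle arr) := by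
  induction arr using List.reverseRecOn with
  | nil => simp [pvRle, pvS, pvLastC, pvTri_zero]
  | append_singleton l x ih =>
    obtain ⟨h1, h2⟩ := ih
    have hfold : (l ++ [x]).foldl (pvStepA val) (0, 0) = pvStepA val (l.foldl (pvStepA val) (0, 0)) x := by
      simp [List.foldl_append]
    have hrle : pvRle (l ++ [x]) = pvStepRle (pvRle l) x := by
      simp [pvRle, List.foldl_append]
    rw [hfold, hrle]
    set st := l.foldl (pvStepA val) (0, 0) with hst
    cases hlast : (pvRle l).getLast? with
    | none =>
      have hnil : pvRle l = [] := List.getLast?_eq_none_iff.mp hlast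
      rw [hnil] at h1 h2
      simp [pvS, pvLastC] at h1 h2
      have h3 : st.2 = 0 := by rw [h2] at h1; simpa [pvTri_zero] using h1
      by_cases hx : x = val <;>
        simp [pvStepRle, hnil, pvStepA, hx, pvS, pvLastC, pvTri_zero, h2, h3]
    | some p =>
      obtain ⟨v, L⟩ := p
      have hne : pvRle l ≠ [] := by
        intro h; rw [h] at hlast; simp at hlast
      have hdec : pvRle l = (pvRle l).dropLast ++ [(v, L)] := by
        conv_lhs => rw [← List.dropLast_append_getLast hne]
        have hgl := List.getLast?_eq_some_getLast (l := pvRle l) hne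
        rw [hlast] at hgl
        rw [← Option.some_inj.mp hgl.symm]
      have hlc : pvLastC val (pvRle l) = if v = val then L else 0 := by
        simp [pvLastC, hlast]
      have hS : pvS val (pvRle l) = pvS val (pvRle l).dropLast + (if v = val then pvTri L else 0) := by
        conv_lhs => rw [hdec]
        rw [pvS_concat]
      by_cases hvx : v = x
      · -- last run extended
        have hstep : pvStepRle (pvRle l) x = (pvRle l).dropLast ++ [(v, L + 1)] := by
          simp [pvStepRle, hlast, hvx]
        rw [hstep]
        by_cases hx : x = val
        · have hv : v = val := hvx.trans hx
          simp [hv] at hlc hS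
          refine ⟨?_, ?_⟩
          · simp only [pvStepA, hx, pvS_concat, hv, if_true]
            have hg : st.2 = pvS val (pvRle l).dropLast := by
              rw [h2, hlc] at h1; rw [hS] at h1; linarith
            rw [hg, h2, hlc]
          · simp [pvStepA, hx, pvLastC, hlast, h2, hv]
        · have hv : v ≠ val := fun h => hx (hvx.symm.trans h)
          simp [hv] at hlc hS
          refine ⟨?_, ?_⟩
          · simp only [pvStepA, hx, pvS_concat, hv, if_false]
            rw [h2, hlc] at h1 ⊢
            simpa [pvTri_zero, hS] using h1
          · simp [pvStepA, hx, pvLastC, hlast, hv, h2]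
      · -- new run appended
        have hstep : pvStepRle (pvRle l) x = pvRle l ++ [(x, 1)] := by
          simp [pvStepRle, hlast, hvx]
        rw [hstep]
        by_cases hx : x = val
        · have hv : v ≠ val := fun h => hvx (h.trans hx.symm)
          simp [hv] at hlc
          refine ⟨?_, ?_⟩
          · simp only [pvStepA, hx, pvS_concat, if_true]
            rw [h2, hlc] at h1
            rw [show st.1 = 0 from by rw [h2, hlc]]
            simp [pvTri_zero] at h1
            rw [h1]; ring_nf
          · simp [pvStepA, hx, pvLastC, hlast, h2, hv]
        · refine ⟨?_, ?_⟩
          · simp [pvStepA, hx, pvS_concat, pvTri_zero, h1]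
          · simp [pvStepA, hx, pvLastC]

-- ===== VERDICT (by name: the statement is the Claim_ definition above) =====
theorem grouping_consecutive_spec : Claim_equal_grouping_consecutive := by
  intro val arr _
  unfold Spec_grouping_consecutive grouping_consecutive grouping_consecutive_alt
  exact (pvInv val arr).1
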